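-- pv_equiv track=rewrite | github.com/shruti-singh/scilm_exp | scripts/corruption_techniques.py | delete_posbased_quartile
-- ===== SOURCE A (Python) =====
-- def delete_posbased_quartile(sents, qnum):
--     total_length = len(sents)
--     qual_len = total_length//3
--     local_quartile_idx = list(range((qnum-1)*qual_len, (qnum*qual_len)))
--
--     new_abs = []
--     for _, s in enumerate(sents):
--         if _ in local_quartile_idx:
--             continue
--         else:
--             new_abs.append(s)
--     return " ".join(new_abs)
-- ===== SOURCE B (Python) =====
-- def delete_posbased_quartile(sents, qnum):
--     qual_len = len(sents) // 3
--     lo = max(0, (qnum - 1) * qual_len)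
--     hi = max(0, qnum * qual_len)
--     return " ".join(sents[:lo] + sents[hi:])
-- ===== Notes on version B (the rewrite author's own statement) =====
-- stated objective: faster
-- what changed: The deleted indices form one contiguous block, so B replaces A's per-element scan of a materialised range list with a direct slice-and-concatenate (clamping negative bounds to 0, which is what makes range() match nothing for qnum<=0).
import Mathlib
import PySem

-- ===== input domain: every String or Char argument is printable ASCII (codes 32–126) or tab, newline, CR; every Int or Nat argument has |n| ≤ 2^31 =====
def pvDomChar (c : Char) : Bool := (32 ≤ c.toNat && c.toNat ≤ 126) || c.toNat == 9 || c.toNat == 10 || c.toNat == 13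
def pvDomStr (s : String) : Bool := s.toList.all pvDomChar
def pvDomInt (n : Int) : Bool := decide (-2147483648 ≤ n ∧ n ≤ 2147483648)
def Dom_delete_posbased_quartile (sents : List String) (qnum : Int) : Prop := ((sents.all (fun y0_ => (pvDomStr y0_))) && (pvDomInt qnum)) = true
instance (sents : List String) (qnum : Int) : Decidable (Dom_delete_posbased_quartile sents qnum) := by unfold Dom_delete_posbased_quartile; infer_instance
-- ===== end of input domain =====

-- B replaces A's per-element scan of a materialised range list by one slice-and-concatenate (the deleted block is contiguous); equivalence proved on all inputs.

-- ===== PORT A =====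
def delete_posbased_quartile (sents : List String) (qnum : Int) : String :=
  let totalLength : Int := sents.length
  let qualLen : Int := PySem.Int.floordiv totalLength 3
  let localQuartileIdx : List Int := PySem.List.pyRange ((qnum - 1) * qualLen) (qnum * qualLen) 1
  let newAbs : List String := (PySem.List.enumerate sents 0).foldl
    (fun acc p => if p.1 ∈ localQuartileIdx then acc else acc ++ [p.2]) []
  PySem.Str.join " " newAbs

-- ===== PORT B =====
def delete_posbased_quartile_alt (sents : List String) (qnum : Int) : String :=
  let qualLen : Int := PySem.Int.floordiv (sents.length : Int) 3
  let lo : Int := max 0 ((qnum - 1) * qualLen)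
  let hi : Int := max 0 (qnum * qualLen)
  PySem.Str.join " " (PySem.List.slice sents none (some lo) ++ PySem.List.slice sents (some hi) none)

-- ===== PRECONDITION & SPEC =====
def Spec_delete_posbased_quartile (sents : List String) (qnum : Int) (out : String) : Prop := out = delete_posbased_quartile_alt sents qnum
instance (sents : List String) (qnum : Int) (out : String) : Decidable (Spec_delete_posbased_quartile sents qnum out) := by unfold Spec_delete_posbased_quartile; infer_instance

-- ===== CLAIM (what is proved, stated in full; the proofs are below) =====
def Claim_equal_delete_posbased_quartile : Prop := ∀ (sents : List String) (qnum : Int), Dom_delete_posbased_quartile sents qnum → Spec_delete_posbased_quartile sents qnum (delete_posbased_quartile sents qnum)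

-- ===== LEMMAS AND PROOFS =====

-- The enumerate-filter that keeps indices outside [a, b) (a ≤ b) returns exactly the
-- prefix before the clamped a plus the suffix from the clamped b.
theorem pv_filter_outside_block {α : Type} (xs : List α) (a b : Int) (hab : a ≤ b) :
    ((PySem.List.enumerate xs 0).filter
        (fun p => decide (¬ (a ≤ p.1 ∧ p.1 < b)))).map Prod.snd
      = xs.take (max 0 a).toNat ++ xs.drop (max 0 b).toNat := by
  have hAi : (((max 0 a).toNat : Int)) = max 0 a := Int.toNat_of_nonneg (le_max_left 0 a)
  have hBi : (((max 0 b).toNat : Int)) = max 0 b := Int.toNat_of_nonneg (le_max_left 0 b)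
  set n := xs.length with hn
  set A' := (max 0 a).toNat with hA
  set B' := (max 0 b).toNat with hB
  set la := min A' n with hla
  set lb := min B' n with hlb
  have hlab : la ≤ lb := by omega
  have hlen1 : (xs.take la).length = la := by simp [hla]; omega
  have hlen2 : ((xs.drop la).take (lb - la)).length = lb - la := by
    simp; omega
  have h3 : (xs.drop la).drop (lb - la) = xs.drop lb := by
    rw [List.drop_drop]; congr 1; omega
  have h2 : (xs.drop la).take (lb - la) ++ xs.drop lb = xs.drop la := by
    rw [← h3, List.take_append_drop]
  have h1 : xs.take la ++ ((xs.drop la).take (lb - la) ++ xs.drop lb) = xs := by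
    rw [h2, List.take_append_drop]
  have hrt : xs.take A' = xs.take la := by
    rcases le_or_gt A' n with h | h
    · simp [hla, Nat.min_eq_left h]
    · rw [hla, Nat.min_eq_right (le_of_lt h), List.take_length,
        List.take_of_length_le (le_of_lt h)]
  have hrd : xs.drop B' = xs.drop lb := by
    rcases le_or_gt B' n with h | h
    · simp [hlb, Nat.min_eq_left h]
    · rw [hlb, Nat.min_eq_right (le_of_lt h), List.drop_length,
        List.drop_eq_nil_of_le (le_of_lt h)]
  rw [hrt, hrd]
  conv_lhs => rw [← h1]
  rw [PySem.List.enumerate_append, PySem.List.enumerate_append,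
    List.filter_append, List.filter_append, List.map_append, List.map_append,
    hlen1, hlen2]
  have hf1 : (PySem.List.enumerate (xs.take la) 0).filter
      (fun p => decide (¬ (a ≤ p.1 ∧ p.1 < b))) = PySem.List.enumerate (xs.take la) 0 := by
    apply List.filter_eq_self.mpr
    intro p hp
    rw [PySem.List.mem_enumerate_iff] at hp
    obtain ⟨k, hk, rfl⟩ := hp
    rw [hlen1] at hk
    simp only [decide_eq_true_eq]
    have : (k : Int) < (la : Int) := by exact_mod_cast hk
    omega
  have hf2 : (PySem.List.enumerate ((xs.drop la).take (lb - la)) (0 + (la : Int))).filter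
      (fun p => decide (¬ (a ≤ p.1 ∧ p.1 < b))) = [] := by
    apply List.filter_eq_nil_iff.mpr
    intro p hp
    rw [PySem.List.mem_enumerate_iff] at hp
    obtain ⟨k, hk, rfl⟩ := hp
    rw [hlen2] at hk
    simp only [decide_eq_true_eq, not_not]
    have : (k : Int) < ((lb : Int) - (la : Int)) := by
      have := hk; omega
    constructor <;> omega
  have hf3 : (PySem.List.enumerate (xs.drop lb) (0 + (la : Int) + ((lb - la : Nat) : Int))).filter
      (fun p => decide (¬ (a ≤ p.1 ∧ p.1 < b))) = PySem.List.enumerate (xs.drop lb) (0 + (la : Int) + ((lb - la : Nat) : Int)) := by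
    apply List.filter_eq_self.mpr
    intro p hp
    rw [PySem.List.mem_enumerate_iff] at hp
    obtain ⟨k, hk, rfl⟩ := hp
    have hk2 : k < n - lb := by simpa using hk
    simp only [decide_eq_true_eq]
    omega
  rw [hf1, hf2, hf3]
  simp [PySem.List.map_snd_enumerate]

theorem delete_posbased_quartile_eq (sents : List String) (qnum : Int) :
    delete_posbased_quartile sents qnum = delete_posbased_quartile_alt sents qnum := by
  simp only [delete_posbased_quartile, delete_posbased_quartile_alt]
  have hq : PySem.Int.floordiv (sents.length : Int) 3 = ((sents.length / 3 : Nat) : Int) := by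
    exact_mod_cast PySem.Int.floordiv_natCast sents.length 3
  set q : Int := PySem.Int.floordiv (sents.length : Int) 3 with hqdef
  have hq0 : 0 ≤ q := by rw [hq]; positivity
  have hab : (qnum - 1) * q ≤ qnum * q := by nlinarith
  have hfe : (fun (acc : List String) (p : Int × String) =>
      if p.1 ∈ PySem.List.pyRange ((qnum - 1) * q) (qnum * q) 1 then acc else acc ++ [p.2])
      = fun acc x => if (fun p : Int × String =>
          decide (¬ ((qnum - 1) * q ≤ p.1 ∧ p.1 < qnum * q))) x then acc ++ [Prod.snd x] else acc := by
    funext acc x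
    by_cases h : (qnum - 1) * q ≤ x.1 ∧ x.1 < qnum * q
    · simp [PySem.List.mem_pyRange_one, h]
    · simp [PySem.List.mem_pyRange_one, h]
  rw [hfe, PySem.List.foldl_append_if, List.nil_append,
    pv_filter_outside_block sents ((qnum - 1) * q) (qnum * q) hab,
    PySem.List.slice_to sents (le_max_left 0 ((qnum - 1) * q)),
    PySem.List.slice_from sents (le_max_left 0 (qnum * q))]

-- ===== VERDICT (by name: the statement is the Claim_ definition above) =====
theorem delete_posbased_quartile_spec : Claim_equal_delete_posbased_quartile := by
  intro sents qnum _
  exact delete_posbased_quartile_eq sents qnum
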